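-- pv_equiv track=rewrite | github.com/WeiChengTW/Peabody-Developmental-Motor-Scales | summer_vacation/fold_paper_1/line_reconstruction.py | get_extension_points
-- ===== SOURCE A (Python) =====
-- def get_extension_points(point, direction, reverse=False):
--     """根據方向取得延伸點"""
--     x, y = point
--     extension_map = {
--         "right": [(1, 0), (2, 0)],
--         "left": [(-1, 0), (-2, 0)],
--         "down": [(0, 1), (0, 2)],
--         "up": [(0, -1), (0, -2)],
--         "down-right": [(1, 1), (2, 2)],
--         "up-left": [(-1, -1), (-2, -2)],
--         "up-right": [(1, -1), (2, -2)],
--         "down-left": [(-1, 1), (-2, 2)],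
--     }
--
--     if direction in extension_map:
--         extensions = extension_map[direction]
--         if reverse:
--             extensions = [(-dx, -dy) for dx, dy in extensions]
--         return [(x + dx, y + dy) for dx, dy in extensions]
--
--     return []
-- ===== SOURCE B (Python) =====
-- def _vertical(t):
--     return {"up": -1, "down": 1}.get(t)
--
--
-- def _horizontal(t):
--     return {"left": -1, "right": 1}.get(t)
--
--
-- def get_extension_points(point, direction, reverse=False):
--     """根據方向取得延伸點"""
--     x, y = point
--     parts = direction.split("-")
--     if len(parts) == 1:
--         v = _vertical(parts[0])
--         h = _horizontal(parts[0])
--         if v is not None: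
--             dx, dy = 0, v
--         elif h is not None:
--             dx, dy = h, 0
--         else:
--             return []
--     elif len(parts) == 2:
--         v = _vertical(parts[0])
--         h = _horizontal(parts[1])
--         if v is None or h is None:
--             return []
--         dx, dy = h, v
--     else:
--         return []
--     if reverse:
--         dx, dy = -dx, -dy
--     return [(x + dx, y + dy), (x + 2 * dx, y + 2 * dy)]
-- ===== Notes on version B (the rewrite author's own statement) =====
-- stated objective: alternative
-- what changed: B has no table of direction vectors at all: it splits the direction string on '-' and derives the unit vector from the vertical/horizontal component words (scaling by 1 and 2 for the two points), whereas A looks the whole string up in a dict of two precomputed offset pairs and negates them with a list pass.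
import Mathlib
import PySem

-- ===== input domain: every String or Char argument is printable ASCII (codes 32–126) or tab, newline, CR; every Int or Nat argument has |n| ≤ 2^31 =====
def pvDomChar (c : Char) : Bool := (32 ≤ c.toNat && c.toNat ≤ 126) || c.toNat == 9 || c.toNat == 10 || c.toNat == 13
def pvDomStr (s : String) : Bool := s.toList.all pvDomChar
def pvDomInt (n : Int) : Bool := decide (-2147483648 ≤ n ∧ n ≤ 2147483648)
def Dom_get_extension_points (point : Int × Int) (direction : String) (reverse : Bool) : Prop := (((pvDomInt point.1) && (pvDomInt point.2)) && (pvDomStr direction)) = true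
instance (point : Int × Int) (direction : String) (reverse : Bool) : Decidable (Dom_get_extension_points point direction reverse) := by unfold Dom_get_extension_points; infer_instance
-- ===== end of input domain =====

-- B parses the direction string (split on "-") into vertical/horizontal components
-- instead of looking the direction up in a table of offset pairs (alternative decomposition).

-- ===== PORT A =====
def extensionMapA : PySem.Dict String (List (Int × Int)) := PySem.Dict.ofList
  [ ("right", [(1, 0), (2, 0)])
  , ("left", [(-1, 0), (-2, 0)])
  , ("down", [(0, 1), (0, 2)])
  , ("up", [(0, -1), (0, -2)])
  , ("down-right", [(1, 1), (2, 2)])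
  , ("up-left", [(-1, -1), (-2, -2)])
  , ("up-right", [(1, -1), (2, -2)])
  , ("down-left", [(-1, 1), (-2, 2)]) ]

def get_extension_points (point : Int × Int) (direction : String) (reverse : Bool) : List (Int × Int) :=
  let x := point.1
  let y := point.2
  if extensionMapA.contains direction then
    let extensions := (extensionMapA.get? direction).getD []
    let extensions := if reverse then extensions.map (fun p => (-p.1, -p.2)) else extensions
    extensions.map (fun p => (x + p.1, y + p.2))
  else
    []

-- ===== PORT B =====
-- {"up": -1, "down": 1}.get(t)
def pvVertical (t : String) : Option Int :=
  (PySem.Dict.ofList [("up", (-1 : Int)), ("down", 1)]).get? t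

-- {"left": -1, "right": 1}.get(t)
def pvHorizontal (t : String) : Option Int :=
  (PySem.Dict.ofList [("left", (-1 : Int)), ("right", 1)]).get? t

def get_extension_points_alt (point : Int × Int) (direction : String) (reverse : Bool) : List (Int × Int) :=
  let x := point.1
  let y := point.2
  -- direction.split("-"); exact: separator is nonempty, so Python's split is Chars.splitOn
  let parts : List String := (PySem.Chars.splitOn direction.toList ['-']).map String.ofList
  -- the early 'return []'s become an Option: none = return []
  let dxy? : Option (Int × Int) :=
    match parts with
    | [t] =>
      match pvVertical t with
      | some v => some (0, v)
      | none =>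
        match pvHorizontal t with
        | some h => some (h, 0)
        | none => none
    | [tv, th] =>
      match pvVertical tv, pvHorizontal th with
      | some v, some h => some (h, v)
      | _, _ => none
    | _ => none
  match dxy? with
  | none => []
  | some (dx, dy) =>
    let d := if reverse then (-dx, -dy) else (dx, dy)
    [(x + d.1, y + d.2), (x + 2 * d.1, y + 2 * d.2)]

-- ===== PRECONDITION & SPEC =====
def Spec_get_extension_points (point : Int × Int) (direction : String) (reverse : Bool) (out : List (Int × Int)) : Prop := out = get_extension_points_alt point direction reverse
instance (point : Int × Int) (direction : String) (reverse : Bool) (out : List (Int × Int)) : Decidable (Spec_get_extension_points point direction reverse out) := by unfold Spec_get_extension_points; infer_instance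

-- ===== CLAIM (what is proved, stated in full; the proofs are below) =====
def Claim_equal_get_extension_points : Prop := ∀ (point : Int × Int) (direction : String) (reverse : Bool), Dom_get_extension_points point direction reverse → Spec_get_extension_points point direction reverse (get_extension_points point direction reverse)

-- ===== LEMMAS AND PROOFS =====
theorem pvVertical_eq (s : String) :
    pvVertical s = if s = "up" then some (-1) else if s = "down" then some 1 else none := by
  have h : (PySem.Dict.ofList [("up", (-1 : Int)), ("down", 1)]).items = [("up", -1), ("down", 1)] := by decide
  simp only [pvVertical, PySem.Dict.get?, h, List.find?]
  rcases eq_or_ne s "up" with h1 | h1 <;> rcases eq_or_ne s "down" with h2 | h2 <;>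
    simp_all [show ∀ a b : String, (a == b) = decide (a = b) from fun a b => rfl, eq_comm]

theorem pvHorizontal_eq (s : String) :
    pvHorizontal s = if s = "left" then some (-1) else if s = "right" then some 1 else none := by
  have h : (PySem.Dict.ofList [("left", (-1 : Int)), ("right", 1)]).items = [("left", -1), ("right", 1)] := by decide
  simp only [pvHorizontal, PySem.Dict.get?, h, List.find?]
  rcases eq_or_ne s "left" with h1 | h1 <;> rcases eq_or_ne s "right" with h2 | h2 <;>
    simp_all [show ∀ a b : String, (a == b) = decide (a = b) from fun a b => rfl, eq_comm]

theorem go_acc (sep : List Char) (fuel : Nat) : ∀ (l cur acc : List Char) (accl : List (List Char)),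
    PySem.Chars.splitOn.go sep fuel l cur (acc :: accl) =
      (acc :: accl).reverse ++ PySem.Chars.splitOn.go sep fuel l cur [] := by
  induction fuel with
  | zero => intro l cur acc accl; simp [PySem.Chars.splitOn.go]
  | succ n ih =>
    intro l cur acc accl
    cases l with
    | nil => simp [PySem.Chars.splitOn.go]
    | cons c rest =>
      rw [PySem.Chars.splitOn.go, PySem.Chars.splitOn.go]
      by_cases h : sep.isPrefixOf (c :: rest) = true
      · simp only [h, if_true]
        rw [ih _ _ (cur.reverse) (acc :: accl), ih _ _ cur.reverse []]
        simp
      · simp only [eq_false_of_ne_true h]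
        exact ih _ _ acc accl

theorem go_ne_nil (sep : List Char) (fuel : Nat) : ∀ (l cur : List Char) (acc : List (List Char)),
    PySem.Chars.splitOn.go sep fuel l cur acc ≠ [] := by
  induction fuel with
  | zero => intro l cur acc; simp [PySem.Chars.splitOn.go]
  | succ n ih =>
    intro l cur acc
    cases l with
    | nil => simp [PySem.Chars.splitOn.go]
    | cons c rest =>
      rw [PySem.Chars.splitOn.go]
      by_cases h : sep.isPrefixOf (c :: rest) = true
      · simp only [h, if_true]; exact ih _ _ _
      · simp only [eq_false_of_ne_true h]; exact ih _ _ _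

theorem join_go (sep : List Char) (hsep : sep ≠ []) (fuel : Nat) :
    ∀ (l cur : List Char), l.length < fuel →
      PySem.Chars.join sep (PySem.Chars.splitOn.go sep fuel l cur []) = cur.reverse ++ l := by
  induction fuel with
  | zero => intro l cur h; omega
  | succ n ih =>
    intro l cur h
    cases l with
    | nil =>
      simp only [PySem.Chars.splitOn.go, List.reverse_cons, List.reverse_nil, List.nil_append]
      simp [PySem.Chars.join, List.intercalate]
    | cons c rest =>
      rw [PySem.Chars.splitOn.go]
      by_cases hp : sep.isPrefixOf (c :: rest) = true
      · simp only [hp, if_true]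
        rw [go_acc]
        have hpre : sep <+: (c :: rest) := List.isPrefixOf_iff_prefix.mp hp
        obtain ⟨t, ht⟩ := hpre
        have hd : (c :: rest).drop sep.length = t := by rw [← ht]; simp
        have hlen : t.length < n := by
          have := congrArg List.length ht
          simp at this
          have hs : 1 ≤ sep.length := by cases sep <;> simp_all
          simp at h; omega
        obtain ⟨r, rs, hgo⟩ : ∃ r rs, PySem.Chars.splitOn.go sep n ((c :: rest).drop sep.length) [] [] = r :: rs := by
          cases hg : PySem.Chars.splitOn.go sep n ((c :: rest).drop sep.length) [] [] with
          | nil => exact absurd hg (go_ne_nil sep n _ _ _)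
          | cons r rs => exact ⟨r, rs, rfl⟩
        have ihs := ih ((c :: rest).drop sep.length) [] (by rw [hd]; exact hlen)
        rw [hgo] at ihs ⊢
        simp only [List.reverse_nil, List.nil_append] at ihs
        show PySem.Chars.join sep (cur.reverse :: r :: rs) = cur.reverse ++ (c :: rest)
        rw [show PySem.Chars.join sep (cur.reverse :: r :: rs) = cur.reverse ++ sep ++ PySem.Chars.join sep (r :: rs) from PySem.Chars.join_cons_cons ..]
        rw [ihs, hd, ← ht]
        simp
      · simp only [eq_false_of_ne_true hp, if_false, Bool.false_eq_true]
        have := ih rest (c :: cur) (by simp at h ⊢; omega)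
        rw [this]; simp

theorem join_splitOn (s sep : List Char) (hsep : sep ≠ []) :
    PySem.Chars.join sep (PySem.Chars.splitOn s sep) = s := by
  rw [PySem.Chars.splitOn]
  rw [join_go sep hsep _ s [] (by omega)]
  simp

theorem keysA : extensionMapA.keys = ["right", "left", "down", "up", "down-right", "up-left", "up-right", "down-left"] := by decide

-- ===== VERDICT (by name: the statement is the Claim_ definition above) =====
theorem get_extension_points_spec : Claim_equal_get_extension_points := by
  intro point direction reverse _
  show get_extension_points point direction reverse = get_extension_points_alt point direction reverse
  by_cases h0 : direction = "right"
  · subst h0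
    cases reverse <;>
      simp [get_extension_points, get_extension_points_alt,
        show extensionMapA.contains "right" = true from by decide,
        show List.map String.ofList (PySem.Chars.splitOn ['r', 'i', 'g', 'h', 't'] ['-']) = ["right"] from by decide,
        show extensionMapA.get? "right" = some [((1:Int), (0:Int)), (2, 0)] from by decide,
        pvVertical_eq, pvHorizontal_eq]
  by_cases h1 : direction = "left"
  · subst h1
    cases reverse <;>
      simp [get_extension_points, get_extension_points_alt,
        show extensionMapA.contains "left" = true from by decide,
        show List.map String.ofList (PySem.Chars.splitOn ['l', 'e', 'f', 't'] ['-']) = ["left"] from by decide,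
        show extensionMapA.get? "left" = some [((-1:Int), (0:Int)), (-2, 0)] from by decide,
        pvVertical_eq, pvHorizontal_eq]
  by_cases h2 : direction = "down"
  · subst h2
    cases reverse <;>
      simp [get_extension_points, get_extension_points_alt,
        show extensionMapA.contains "down" = true from by decide,
        show List.map String.ofList (PySem.Chars.splitOn ['d', 'o', 'w', 'n'] ['-']) = ["down"] from by decide,
        show extensionMapA.get? "down" = some [((0:Int), (1:Int)), (0, 2)] from by decide,
        pvVertical_eq]
  by_cases h3 : direction = "up"
  · subst h3
    cases reverse <;>
      simp [get_extension_points, get_extension_points_alt,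
        show extensionMapA.contains "up" = true from by decide,
        show List.map String.ofList (PySem.Chars.splitOn ['u', 'p'] ['-']) = ["up"] from by decide,
        show extensionMapA.get? "up" = some [((0:Int), (-1:Int)), (0, -2)] from by decide,
        pvVertical_eq]
  by_cases h4 : direction = "down-right"
  · subst h4
    cases reverse <;>
      simp [get_extension_points, get_extension_points_alt,
        show extensionMapA.contains "down-right" = true from by decide,
        show List.map String.ofList (PySem.Chars.splitOn ['d', 'o', 'w', 'n', '-', 'r', 'i', 'g', 'h', 't'] ['-']) = ["down", "right"] from by decide,
        show extensionMapA.get? "down-right" = some [((1:Int), (1:Int)), (2, 2)] from by decide,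
        pvVertical_eq, pvHorizontal_eq]
  by_cases h5 : direction = "up-left"
  · subst h5
    cases reverse <;>
      simp [get_extension_points, get_extension_points_alt,
        show extensionMapA.contains "up-left" = true from by decide,
        show List.map String.ofList (PySem.Chars.splitOn ['u', 'p', '-', 'l', 'e', 'f', 't'] ['-']) = ["up", "left"] from by decide,
        show extensionMapA.get? "up-left" = some [((-1:Int), (-1:Int)), (-2, -2)] from by decide,
        pvVertical_eq, pvHorizontal_eq]
  by_cases h6 : direction = "up-right"
  · subst h6
    cases reverse <;>
      simp [get_extension_points, get_extension_points_alt,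
        show extensionMapA.contains "up-right" = true from by decide,
        show List.map String.ofList (PySem.Chars.splitOn ['u', 'p', '-', 'r', 'i', 'g', 'h', 't'] ['-']) = ["up", "right"] from by decide,
        show extensionMapA.get? "up-right" = some [((1:Int), (-1:Int)), (2, -2)] from by decide,
        pvVertical_eq, pvHorizontal_eq]
  by_cases h7 : direction = "down-left"
  · subst h7
    cases reverse <;>
      simp [get_extension_points, get_extension_points_alt,
        show extensionMapA.contains "down-left" = true from by decide,
        show List.map String.ofList (PySem.Chars.splitOn ['d', 'o', 'w', 'n', '-', 'l', 'e', 'f', 't'] ['-']) = ["down", "left"] from by decide,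
        show extensionMapA.get? "down-left" = some [((-1:Int), (1:Int)), (-2, 2)] from by decide,
        pvVertical_eq, pvHorizontal_eq]
  -- direction is none of the eight keys: both sides return []
  have hc : extensionMapA.contains direction = false := by
    rw [PySem.Dict.contains_eq_decide_mem_keys, keysA]
    simp [h0, h1, h2, h3, h4, h5, h6, h7]
  have hj : PySem.Chars.join ['-'] (PySem.Chars.splitOn direction.toList ['-']) = direction.toList :=
    join_splitOn direction.toList ['-'] (by simp)
  simp only [get_extension_points, hc, Bool.false_eq_true, if_false]
  simp only [get_extension_points_alt]
  rcases hpc : PySem.Chars.splitOn direction.toList ['-'] with _ | ⟨t, _ | ⟨t2, _ | ⟨t3, ts⟩⟩⟩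
  · rfl
  · -- one token: direction itself; it is none of the four axis words
    rw [hpc] at hj
    have ht : t = direction.toList := by simpa [PySem.Chars.join, List.intercalate] using hj
    have hsd : String.ofList t = direction := by rw [ht]; simp
    simp [hsd, pvVertical_eq, pvHorizontal_eq, h0, h1, h2, h3]
  · -- two tokens: direction = t ++ "-" ++ t2; a diagonal key would contradict h4..h7
    rw [hpc] at hj
    have ht : t ++ '-' :: t2 = direction.toList := by
      rw [PySem.Chars.join_cons_cons] at hj
      simpa [PySem.Chars.join, List.intercalate] using hj
    have hdir : ∀ (a b : String), String.ofList t = a → String.ofList t2 = b →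
        direction = String.ofList (a.toList ++ '-' :: b.toList) := by
      intro a b ha hb
      have h1' := congrArg String.toList ha
      have h2' := congrArg String.toList hb
      simp at h1' h2'
      apply_fun String.toList
      · simp [← ht, h1', h2']
      · intro u v huv; have := congrArg String.ofList huv; simpa using this
    simp only [List.map]
    rw [pvVertical_eq, pvHorizontal_eq]
    rcases eq_or_ne (String.ofList t) "up" with hu | hu <;>
      rcases eq_or_ne (String.ofList t) "down" with hd | hd <;>
        rcases eq_or_ne (String.ofList t2) "left" with hl | hl <;>
          rcases eq_or_ne (String.ofList t2) "right" with hr | hr <;>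
            simp [hu, hd, hl, hr] <;>
    first
      | (exact absurd (hu.symm.trans hd) (by decide))
      | (exact absurd (hl.symm.trans hr) (by decide))
      | (exact absurd (hdir _ _ hu hl) (by simpa using h5))
      | (exact absurd (hdir _ _ hu hr) (by simpa using h6))
      | (exact absurd (hdir _ _ hd hl) (by simpa using h7))
      | (exact absurd (hdir _ _ hd hr) (by simpa using h4))
  · rfl
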